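-- pv_equiv track=rewrite | github.com/Retlaw90/Exercises-on-Python-Fundamentals | Serve2.py | ContaUgualiInAltroPostoestesso
-- ===== SOURCE A (Python) =====
-- def ContaUgualiInAltroPostoestesso (ls, lsCheck):
--
--     stessoposto=0
--     for i in range(len(lsCheck)):
--         if lsCheck[i] == ls[i]:
--             stessoposto += 1
--             ls[i]=None
--             lsCheck[i]=None
--     altroposto=0
--     for i in range(len(lsCheck)):
--         if lsCheck[i] != None and lsCheck[i] in ls:
--             altroposto += 1
--             ls.remove(lsCheck[i])
--     return stessoposto, altroposto
-- ===== SOURCE B (Python) =====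
-- def ContaUgualiInAltroPostoestesso(ls, lsCheck):
--     # Closed form: count same-position matches, then take the multiset-intersection
--     # size of the remaining values (sum over distinct values of the min of the two
--     # histograms) instead of A's sequential consume-from-the-list pass. No mutation.
--     pairs = list(zip(ls, lsCheck))
--     stessoposto = sum(1 for x, y in pairs if x == y)
--     cl = {}
--     for x, y in pairs:
--         if x != y:
--             cl[x] = cl.get(x, 0) + 1
--     for x in ls[len(lsCheck):]:
--         cl[x] = cl.get(x, 0) + 1
--     cc = {}
--     for x, y in pairs:
--         if x != y:
--             cc[y] = cc.get(y, 0) + 1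
--     altroposto = sum(min(c, cc.get(v, 0)) for v, c in cl.items())
--     return stessoposto, altroposto
-- ===== Notes on version B (the rewrite author's own statement) =====
-- stated objective: faster
-- what changed: Replaces A's sequential consume-from-the-pool second pass ('in ls' + list.remove per element) by a closed-form multiset-intersection size: build two count histograms of the unmatched values and sum min of the counts over the distinct values; B also does not mutate its arguments.
import Mathlib
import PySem

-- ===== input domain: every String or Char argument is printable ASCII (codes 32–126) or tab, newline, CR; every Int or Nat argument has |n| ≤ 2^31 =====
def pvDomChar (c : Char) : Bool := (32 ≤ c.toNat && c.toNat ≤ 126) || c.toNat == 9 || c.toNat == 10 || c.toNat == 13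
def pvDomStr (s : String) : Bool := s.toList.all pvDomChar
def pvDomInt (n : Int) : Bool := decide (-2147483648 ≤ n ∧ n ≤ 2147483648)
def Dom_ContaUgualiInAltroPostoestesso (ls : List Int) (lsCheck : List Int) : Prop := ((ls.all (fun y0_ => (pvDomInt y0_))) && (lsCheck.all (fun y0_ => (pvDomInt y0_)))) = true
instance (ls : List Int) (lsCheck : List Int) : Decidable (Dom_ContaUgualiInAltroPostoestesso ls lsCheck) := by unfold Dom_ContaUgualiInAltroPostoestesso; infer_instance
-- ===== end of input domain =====

-- B replaces A's sequential consume-from-the-pool second pass by a closed-form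
-- multiset-intersection size (sum over distinct values of the min of two count
-- histograms); equivalence is about the RETURN value only (A mutates both
-- argument lists in place, B does not).

-- ===== PORT A =====
-- A mutates ls/lsCheck, writing None into matched slots: both lists are modelled
-- as List (Option Int) internally (some = the int, none = Python's None).
def pvA_step1 (st : Int × List (Option Int) × List (Option Int)) (i : Int) :
    Int × List (Option Int) × List (Option Int) :=
  match PySem.List.pyGet? st.2.2 i, PySem.List.pyGet? st.2.1 i with
  | some cv, some lv =>
      if cv == lv then
        (st.1 + 1, PySem.List.pySetD st.2.1 i none, PySem.List.pySetD st.2.2 i none)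
      else st
  | _, _ => st

def pvA_step2 (c : List (Option Int)) (st : Int × List (Option Int)) (i : Int) :
    Int × List (Option Int) :=
  match PySem.List.pyGet? c i with
  | some cv =>
      if cv != none && st.2.contains cv then
        (st.1 + 1, (PySem.List.remove? st.2 cv).getD st.2)
      else st
  | none => st

def ContaUgualiInAltroPostoestesso (ls : List Int) (lsCheck : List Int) : Int × Int :=
  let r1 := (PySem.List.pyRange 0 (lsCheck.length : Int)).foldl pvA_step1
              (0, ls.map some, lsCheck.map some)
  let r2 := (PySem.List.pyRange 0 (lsCheck.length : Int)).foldl (pvA_step2 r1.2.2)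
              ((0 : Int), r1.2.1)
  (r1.1, r2.1)

-- ===== PORT B =====
def ContaUgualiInAltroPostoestesso_alt (ls : List Int) (lsCheck : List Int) : Int × Int :=
  let pairs := ls.zip lsCheck
  let stessoposto : Int := pairs.foldl (fun acc p => if p.1 == p.2 then acc + 1 else acc) 0
  let cl0 := pairs.foldl
      (fun d p => if p.1 != p.2 then d.insert p.1 (d.getD p.1 0 + 1) else d)
      (PySem.Dict.empty : PySem.Dict Int Int)
  let cl := (ls.drop lsCheck.length).foldl (fun d x => d.insert x (d.getD x 0 + 1)) cl0
  let cc := pairs.foldl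
      (fun d p => if p.1 != p.2 then d.insert p.2 (d.getD p.2 0 + 1) else d)
      (PySem.Dict.empty : PySem.Dict Int Int)
  let altroposto : Int := cl.items.foldl (fun acc p => acc + min p.2 (cc.getD p.1 0)) 0
  (stessoposto, altroposto)

-- ===== PRECONDITION & SPEC =====
-- Pre_ excludes exactly the inputs where A raises IndexError: the first loop reads
-- ls[i] for every i < len(lsCheck), so lsCheck may not be longer than ls.
def Pre_ContaUgualiInAltroPostoestesso (ls : List Int) (lsCheck : List Int) : Prop :=
  lsCheck.length ≤ ls.length
instance (ls : List Int) (lsCheck : List Int) : Decidable (Pre_ContaUgualiInAltroPostoestesso ls lsCheck) := by unfold Pre_ContaUgualiInAltroPostoestesso; infer_instance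

def pvWitness_ContaUgualiInAltroPostoestesso : List Int × List Int := ([1, 2, 3, 4], [3, 2, 1])

def Spec_ContaUgualiInAltroPostoestesso (ls : List Int) (lsCheck : List Int) (out : Int × Int) : Prop := out = ContaUgualiInAltroPostoestesso_alt ls lsCheck
instance (ls : List Int) (lsCheck : List Int) (out : Int × Int) : Decidable (Spec_ContaUgualiInAltroPostoestesso ls lsCheck out) := by unfold Spec_ContaUgualiInAltroPostoestesso; infer_instance

-- ===== CLAIM (what is proved, stated in full; the proofs are below) =====
def Claim_equal_ContaUgualiInAltroPostoestesso : Prop := ∀ (ls : List Int) (lsCheck : List Int), Dom_ContaUgualiInAltroPostoestesso ls lsCheck → Pre_ContaUgualiInAltroPostoestesso ls lsCheck → Spec_ContaUgualiInAltroPostoestesso ls lsCheck (ContaUgualiInAltroPostoestesso ls lsCheck)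

-- ===== LEMMAS AND PROOFS =====

-- the two mask functions of A's first pass, on a (ls-value, lsCheck-value) pair
def pvMaskL (p : Int × Int) : Option Int := if p.1 == p.2 then none else some p.1
def pvMaskC (p : Int × Int) : Option Int := if p.1 == p.2 then none else some p.2

-- A's first pass, characterised (generalised over an already-processed prefix)
theorem pvLoop1_aux (b : List Int) : ∀ (a : List Int) (pl pc : List (Option Int)) (s : Int),
    pl.length = pc.length → b.length ≤ a.length →
    (PySem.List.pyRange (pc.length : Int) ((pc.length : Int) + b.length)).foldl pvA_step1
        (s, pl ++ a.map some, pc ++ b.map some)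
    = (s + ((a.zip b).countP (fun p => p.1 == p.2) : Int),
       pl ++ ((a.zip b).map pvMaskL) ++ ((a.drop b.length).map some),
       pc ++ ((a.zip b).map pvMaskC)) := by
  induction b with
  | nil =>
    intro a pl pc s hl hle
    simp [PySem.List.pyRange]
  | cons y bs ih =>
    intro a pl pc s hl hle
    match a with
    | [] => simp at hle
    | x :: as =>
      have hle' : bs.length ≤ as.length := by simpa using hle
      have hlt : (pc.length : Int) < (pc.length : Int) + (((y :: bs).length : Nat) : Int) := by
        push_cast [List.length_cons]; omega
      rw [PySem.List.pyRange_one_cons hlt]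
      simp only [List.map_cons, List.foldl_cons]
      have e1 : PySem.List.pyGet? (pc ++ some y :: List.map some bs) ((pc.length : Int)) = some (some y) :=
        PySem.List.pyGet?_append_length _ _ _
      have e2 : PySem.List.pyGet? (pl ++ some x :: List.map some as) ((pc.length : Int)) = some (some x) := by
        rw [← hl]; exact PySem.List.pyGet?_append_length _ _ _
      have hrange : PySem.List.pyRange ((pc.length : Int) + 1) ((pc.length : Int) + (((y :: bs).length : Nat) : Int))
          = PySem.List.pyRange (((pc ++ [pvMaskC (x, y)]).length : Nat) : Int) ((((pc ++ [pvMaskC (x, y)]).length : Nat) : Int) + ((bs.length : Nat) : Int)) := by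
        congr 1 <;> push_cast [List.length_append, List.length_cons, List.length_nil] <;> ring
      by_cases hxy : x = y
      · subst hxy
        have hstep : pvA_step1 (s, pl ++ some x :: List.map some as, pc ++ some x :: List.map some bs) ((pc.length : Int))
            = (s + 1, (pl ++ [pvMaskL (x, x)]) ++ List.map some as, (pc ++ [pvMaskC (x, x)]) ++ List.map some bs) := by
          simp only [pvA_step1, e1, e2, beq_self_eq_true, if_pos, PySem.List.pySetD_natCast, pvMaskL, pvMaskC]
          simp [hl]
        rw [hstep, hrange,
          ih as (pl ++ [pvMaskL (x, x)]) (pc ++ [pvMaskC (x, x)]) (s + 1) (by simp [hl]) hle']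
        simp [pvMaskL, pvMaskC, List.append_assoc]
        ring
      · have hstep : pvA_step1 (s, pl ++ some x :: List.map some as, pc ++ some y :: List.map some bs) ((pc.length : Int))
            = (s, (pl ++ [pvMaskL (x, y)]) ++ List.map some as, (pc ++ [pvMaskC (x, y)]) ++ List.map some bs) := by
          have hbe : ((some y : Option Int) == some x) = false := by
            simp [beq_eq_false_iff_ne]; exact fun h => hxy h.symm
          simp [pvA_step1, e2, hbe, pvMaskL, pvMaskC, hxy]
        rw [hstep, hrange,
          ih as (pl ++ [pvMaskL (x, y)]) (pc ++ [pvMaskC (x, y)]) s (by simp [hl]) hle']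
        simp [pvMaskL, pvMaskC, List.append_assoc, hxy]

-- List.count is the same for any two lawful BEq instances (bridges the counts
-- coming from Multiset.coe_count to the ambient ones)
theorem pvCountInst {a : Type} [DecidableEq a] [inst2 : BEq a] [LawfulBEq a] (x : a) (l : List a) :
    @List.count a instBEqOfDecidableEq x l = @List.count a inst2 x l := by
  induction l with
  | nil => rfl
  | cons y t ih => by_cases h : y = x <;> simp [ih, h]

-- List.erase is the same for any two lawful BEq instances
theorem pvEraseInst (l : List (Option Int)) (a : Option Int) :
    @List.erase _ instBEqOfDecidableEq l a = @List.erase _ Option.instBEq l a := by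
  induction l with
  | nil => rfl
  | cons x t ih => by_cases h : x = a <;> simp [ih, h]

-- A's greedy second pass counts exactly the multiset-intersection size of the
-- pool with the scanned values
theorem pvGreedy_card (ys : List Int) : ∀ (pool : List (Option Int)) (acc : Int),
    (ys.foldl (fun st y =>
        if st.2.contains (some y) then
          (st.1 + 1, (PySem.List.remove? st.2 (some y)).getD st.2)
        else st) (acc, pool)).1
    = acc + ((((pool : Multiset (Option Int)) ∩ ((ys.map some : List (Option Int)) : Multiset (Option Int))).card : Nat) : Int) := by
  induction ys with
  | nil => intro pool acc; simp
  | cons y t ih =>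
    intro pool acc
    simp only [List.foldl_cons, List.map_cons]
    by_cases hmem : (some y) ∈ pool
    · have hcont : pool.contains (some y) = true := by simpa using hmem
      have herase : (PySem.List.remove? pool (some y)).getD pool = pool.erase (some y) := by
        rw [PySem.List.remove?_eq_some_erase pool (some y) hmem]; rfl
      simp only [hcont, if_true, herase]
      rw [ih]
      have hmemM : some y ∈ (pool : Multiset (Option Int)) := Multiset.mem_coe.mpr hmem
      have : (pool : Multiset (Option Int)) ∩ (some y ::ₘ ((t.map some : List (Option Int)) : Multiset (Option Int)))
          = some y ::ₘ (((pool.erase (some y) : List (Option Int)) : Multiset (Option Int)) ∩ ((t.map some : List (Option Int)) : Multiset (Option Int))) := by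
        rw [Multiset.inter_comm, Multiset.cons_inter_of_pos _ hmemM, Multiset.inter_comm,
          Multiset.coe_erase, pvEraseInst]
      rw [← Multiset.cons_coe, this]
      simp
      omega
    · have hcont : pool.contains (some y) = false := by simpa using hmem
      simp only [hcont, Bool.false_eq_true, if_false]
      rw [ih]
      have hmemM : some y ∉ (pool : Multiset (Option Int)) := fun h => hmem (Multiset.mem_coe.mp h)
      have : (pool : Multiset (Option Int)) ∩ (some y ::ₘ ((t.map some : List (Option Int)) : Multiset (Option Int)))
          = (pool : Multiset (Option Int)) ∩ ((t.map some : List (Option Int)) : Multiset (Option Int)) := by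
        rw [Multiset.inter_comm, Multiset.cons_inter_of_neg _ hmemM, Multiset.inter_comm]
      rw [← Multiset.cons_coe, this]

-- the multiset-intersection size as a sum of min over the distinct pool values
theorem pvSumMin (L C : List Int) (pool : List (Option Int))
    (hc : ∀ v : Int, pool.count (some v) = L.count v) :
    ((PySem.Set.ofList L).map (fun k => min ((L.count k : Nat) : Int) ((C.count k : Nat) : Int))).sum
    = ((((pool : Multiset (Option Int)) ∩ ((C.map some : List (Option Int)) : Multiset (Option Int))).card : Nat) : Int) := by
  have hnat : ((PySem.Set.ofList L).map (fun k => min (L.count k) (C.count k))).sum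
      = ((pool : Multiset (Option Int)) ∩ ((C.map some : List (Option Int)) : Multiset (Option Int))).card := by
    set m := (pool : Multiset (Option Int)) ∩ ((C.map some : List (Option Int)) : Multiset (Option Int)) with hm
    have hcount : ∀ v : Int, m.count (some v) = min (L.count v) (C.count v) := by
      intro v
      rw [hm, Multiset.count_inter, Multiset.coe_count, Multiset.coe_count,
        pvCountInst, pvCountInst, hc v,
        List.count_map_of_injective _ some (fun a b h => Option.some.inj h) v]
    have hnone : m.count none = 0 := by
      rw [hm, Multiset.count_inter]
      have h0 : (C.map some).count (none : Option Int) = 0 := by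
        rw [List.count_eq_zero]; simp
      rw [Multiset.coe_count, Multiset.coe_count, pvCountInst, pvCountInst, h0]
      simp
    have hcard : m.card = ∑ a ∈ m.toFinset, m.count a := (Multiset.toFinset_sum_count_eq m).symm
    have hsub : m.toFinset ⊆ (PySem.Set.ofList L).toFinset.image some := by
      intro a ha
      rcases a with _ | v
      · have := Multiset.count_pos.mpr (Multiset.mem_toFinset.mp ha)
        omega
      · have hpos : 0 < m.count (some v) := Multiset.count_pos.mpr (Multiset.mem_toFinset.mp ha)
        rw [hcount v] at hpos
        have hvL : v ∈ L := List.count_pos_iff.mp (by omega)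
        exact Finset.mem_image.mpr ⟨v, List.mem_toFinset.mpr ((PySem.Set.mem_ofList _ _).mpr hvL), rfl⟩
    have hext : ∑ a ∈ (PySem.Set.ofList L).toFinset.image some, m.count a
        = ∑ a ∈ m.toFinset, m.count a := by
      symm
      apply Finset.sum_subset hsub
      intro a _ ha
      exact Multiset.count_eq_zero_of_notMem (fun h => ha (Multiset.mem_toFinset.mpr h))
    have himg : ∑ a ∈ (PySem.Set.ofList L).toFinset.image some, m.count a
        = ∑ v ∈ (PySem.Set.ofList L).toFinset, m.count (some v) :=
      Finset.sum_image (fun a _ b _ h => Option.some.inj h)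
    have hlist : ((PySem.Set.ofList L).map (fun k => min (L.count k) (C.count k))).sum
        = ∑ v ∈ (PySem.Set.ofList L).toFinset, min (L.count v) (C.count v) :=
      (List.sum_toFinset _ (PySem.Set.nodup_ofList L)).symm
    rw [hlist, hcard, ← hext, himg]
    exact Finset.sum_congr rfl (fun v _ => (hcount v).symm)
  have hfun : (fun k => min ((L.count k : Nat) : Int) ((C.count k : Nat) : Int))
      = (fun k => ((min (L.count k) (C.count k) : Nat) : Int)) := by
    funext k; simp
  rw [hfun]
  rw [show (fun k => ((min (L.count k) (C.count k) : Nat) : Int))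
      = (Nat.cast ∘ fun k => min (L.count k) (C.count k)) from rfl,
    ← List.map_map, ← Nat.cast_list_sum, hnat]

-- count of a value in the masked ls-side list = its count among unmatched ls values
theorem pvCount_maskL (l : List (Int × Int)) (v : Int) :
    (l.map pvMaskL).count (some v)
    = ((l.filter (fun p => p.1 != p.2)).map (fun p => p.1)).count v := by
  induction l with
  | nil => rfl
  | cons p t ih =>
    by_cases h : p.1 = p.2 <;>
      simp [pvMaskL, h, List.count_cons, ih]

-- ===== VERDICT (by name: the statement is the Claim_ definition above) =====
theorem ContaUgualiInAltroPostoestesso_spec : Claim_equal_ContaUgualiInAltroPostoestesso := by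
  intro ls lsCheck _dom hpre
  unfold Spec_ContaUgualiInAltroPostoestesso
  unfold ContaUgualiInAltroPostoestesso ContaUgualiInAltroPostoestesso_alt
  have h1 : (PySem.List.pyRange 0 (lsCheck.length : Int)).foldl pvA_step1
      (0, ls.map some, lsCheck.map some)
      = (((ls.zip lsCheck).countP (fun p => p.1 == p.2) : Int),
         ((ls.zip lsCheck).map pvMaskL) ++ ((ls.drop lsCheck.length).map some),
         (ls.zip lsCheck).map pvMaskC) := by
    simpa using pvLoop1_aux lsCheck ls [] [] 0 rfl hpre
  rw [h1]
  set pairs := ls.zip lsCheck with hpairs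
  set pool := (pairs.map pvMaskL) ++ ((ls.drop lsCheck.length).map some) with hpool
  set c := pairs.map pvMaskC with hc
  have hclen : c.length = lsCheck.length := by
    have hp : lsCheck.length ≤ ls.length := hpre
    simp [hc, hpairs, List.length_zip]
    omega
  dsimp only
  simp only [Prod.mk.injEq]
  constructor
  · rw [PySem.List.foldl_if_add_one]
    simp
  · -- A's index-driven second loop as a fold over the elements of c
    have hbody : ∀ (acc : Int × List (Option Int)), ∀ j ∈ PySem.List.pyRange 0 (PySem.List.len c),
        pvA_step2 c acc j
        = (fun (st : Int × List (Option Int)) (j : Int) =>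
            (fun (st : Int × List (Option Int)) (cv : Option Int) =>
              if cv != none && st.2.contains cv then
                (st.1 + 1, (PySem.List.remove? st.2 cv).getD st.2)
              else st) st (PySem.List.pyGetD c j none)) acc j := by
      intro acc j hj
      obtain ⟨hj0, hj1⟩ := PySem.List.mem_pyRange_one.mp hj
      have hj1' : j < (c.length : Int) := by simpa [PySem.List.len] using hj1
      simp [pvA_step2, PySem.List.pyGet?_eq_some_getElem c hj0 hj1',
        PySem.List.pyGetD_eq_getElem c none hj0 hj1']
    have hA2 : List.foldl (pvA_step2 c) ((0 : Int), pool) (PySem.List.pyRange 0 (lsCheck.length : Int))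
        = List.foldl (fun (st : Int × List (Option Int)) (cv : Option Int) =>
            if cv != none && st.2.contains cv then
              (st.1 + 1, (PySem.List.remove? st.2 cv).getD st.2)
            else st) ((0 : Int), pool) c := by
      have hlc : (lsCheck.length : Int) = PySem.List.len c := by
        simp [PySem.List.len, hclen]
      rw [hlc, PySem.List.foldl_congr_mem _ _ _ _ hbody]
      simpa using PySem.List.foldl_pyRange_pyGetD c none
        (fun (st : Int × List (Option Int)) (cv : Option Int) =>
          if cv != none && st.2.contains cv then
            (st.1 + 1, (PySem.List.remove? st.2 cv).getD st.2)
          else st) ((0 : Int), pool) (le_refl 0)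
    rw [hA2, hc, List.foldl_map]
    have hsplitA : ∀ (acc : Int × List (Option Int)), ∀ p ∈ pairs,
        (fun (st : Int × List (Option Int)) (p : Int × Int) =>
          (fun (st : Int × List (Option Int)) (cv : Option Int) =>
            if cv != none && st.2.contains cv then
              (st.1 + 1, (PySem.List.remove? st.2 cv).getD st.2)
            else st) st (pvMaskC p)) acc p
        = (fun (st : Int × List (Option Int)) (p : Int × Int) =>
            if p.1 != p.2 then
              (if st.2.contains (some p.2) then
                (st.1 + 1, (PySem.List.remove? st.2 (some p.2)).getD st.2)
              else st)
            else st) acc p := by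
      intro acc p _
      by_cases h : p.1 = p.2 <;> simp [pvMaskC, h]
    rw [PySem.List.foldl_congr_mem _ _ _ _ hsplitA, PySem.List.foldl_if_eq_foldl_filter]
    have hmapA := (List.foldl_map (f := fun p : Int × Int => p.2)
      (g := fun (st : Int × List (Option Int)) (y : Int) =>
        if st.2.contains (some y) then
          (st.1 + 1, (PySem.List.remove? st.2 (some y)).getD st.2)
        else st)
      (l := pairs.filter (fun p => p.1 != p.2)) (init := ((0 : Int), pool)))
    rw [← hmapA]
    -- left side: A's greedy count = |pool ∩ unmatched-lsCheck values|
    rw [pvGreedy_card]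
    -- right side: B's sum of min over the histogram items
    set L := ((pairs.filter (fun p => p.1 != p.2)).map (fun p => p.1)) ++ ls.drop lsCheck.length with hL
    set ys := (pairs.filter (fun p => p.1 != p.2)).map (fun p => p.2) with hys
    have hcl : (ls.drop lsCheck.length).foldl (fun d x => d.insert x (d.getD x 0 + 1))
        (pairs.foldl (fun d p => if p.1 != p.2 then d.insert p.1 (d.getD p.1 0 + 1) else d)
          (PySem.Dict.empty : PySem.Dict Int Int))
        = PySem.Dict.counter L := by
      have hmapCl := List.foldl_map (f := fun p : Int × Int => p.1)
        (g := fun (d : PySem.Dict Int Int) (x : Int) => d.insert x (d.getD x 0 + 1))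
        (l := pairs.filter (fun p => p.1 != p.2))
        (init := (PySem.Dict.empty : PySem.Dict Int Int))
      rw [PySem.List.foldl_if_eq_foldl_filter, ← hmapCl,
        ← List.foldl_append, hL, PySem.Dict.foldl_insert_getD_add_one_eq_counter]
    have hcc : pairs.foldl (fun d p => if p.1 != p.2 then d.insert p.2 (d.getD p.2 0 + 1) else d)
        (PySem.Dict.empty : PySem.Dict Int Int)
        = PySem.Dict.counter ys := by
      have hmapCc := List.foldl_map (f := fun p : Int × Int => p.2)
        (g := fun (d : PySem.Dict Int Int) (x : Int) => d.insert x (d.getD x 0 + 1))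
        (l := pairs.filter (fun p => p.1 != p.2))
        (init := (PySem.Dict.empty : PySem.Dict Int Int))
      rw [PySem.List.foldl_if_eq_foldl_filter, ← hmapCc,
        hys, PySem.Dict.foldl_insert_getD_add_one_eq_counter]
    rw [hcl, hcc, PySem.List.foldl_add, PySem.Dict.items_counter]
    simp only [List.map_map, Function.comp_def, PySem.Dict.getD_counter]
    have hcnt : ∀ v : Int, pool.count (some v) = L.count v := by
      intro v
      rw [hpool, List.count_append, pvCount_maskL, hL, List.count_append,
        List.count_map_of_injective _ some (fun a b h => Option.some.inj h) v]
    have hsum := pvSumMin L ys pool hcnt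
    rw [hsum]
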